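-- pv_equiv track=rewrite | github.com/jimy-byerley/pymadcad | generation.py | makeloops
-- ===== SOURCE A (Python) =====
-- from collections import Counter
--
-- def makeloops(lines, faces=(), oriented=True):	# TODO: mettre en commun avec boolean et cut
-- 	''' return a list of the loops that can be formed with lines.
-- 		lines must be oriented suite of points and loops are returned as suite of points.
-- 	'''
-- 	lines = list(lines)
-- 	# get contiguous suite of points
-- 	loops = []
-- 	while lines:
-- 		loop = list(lines.pop())
-- 		found = True
-- 		while found:
-- 			found = False
-- 			for i,edge in enumerate(lines):
-- 				if edge[-1] == loop[0]:		loop[0:1] = edge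
-- 				elif edge[0] == loop[-1]:	loop[-1:] = edge
-- 				# for unoriented lines
-- 				elif not oriented and edge[0] == loop[0]:	loop[0:1] = reversed(edge)
-- 				elif not oriented and edge[-1] == loop[-1]:	loop[-1:] = reversed(edge)
-- 				else:
-- 					continue
-- 				lines.pop(i)
-- 				found = True
-- 				break
-- 		loops.append(loop)
-- 	# cut at loop intersections (sub loops or crossing loops)
-- 	reach = Counter()
-- 	for loop in loops:
-- 		for p in loop:
-- 			reach[p] += 1
-- 	for loop in loops:
-- 		for i in range(1,len(loop)-1):
-- 			if reach[loop[i]] > 1: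
-- 				loops.append(loop[i:])
-- 				loop[i+1:] = []
-- 				break
-- 	return loops
-- ===== SOURCE B (Python) =====
-- from collections import Counter, defaultdict, deque
--
-- def makeloops(lines, faces=(), oriented=True):
--     ''' return a list of the loops that can be formed with lines.
--         Endpoints are indexed in hash buckets so the segment extending a chain is
--         found in O(1) instead of rescanning the remaining lines each time.
--     '''
--     edges = [list(l) for l in lines]
--     heads = defaultdict(deque)   # point -> indices of edges starting there, oldest first
--     tails = defaultdict(deque)   # point -> indices of edges ending there, oldest first
--     for i, e in enumerate(edges):
--         heads[e[0]].append(i)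
--         tails[e[-1]].append(i)
--     alive = [True] * len(edges)
--
--     def take(bucket):
--         # oldest still-alive index in the bucket, dropping consumed ones
--         while bucket and not alive[bucket[0]]:
--             bucket.popleft()
--         return bucket[0] if bucket else None
--
--     # assemble maximal chains, consuming edges; a deque grows cheaply at both ends
--     loops = []
--     for seed in reversed(range(len(edges))):
--         if not alive[seed]:
--             continue
--         alive[seed] = False
--         loop = deque(edges[seed])
--         while True:
--             candidates = [take(tails[loop[0]]), take(heads[loop[-1]])]
--             if not oriented:
--                 candidates += [take(heads[loop[0]]), take(tails[loop[-1]])]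
--             live = [c for c in candidates if c is not None]
--             if not live:
--                 break
--             i = min(live)            # always attach the oldest matching segment
--             alive[i] = False
--             e = edges[i]
--             if e[-1] == loop[0]:
--                 loop.popleft(); loop.extendleft(reversed(e))
--             elif e[0] == loop[-1]:
--                 loop.pop(); loop.extend(e)
--             elif not oriented and e[0] == loop[0]:
--                 loop.popleft(); loop.extendleft(e)
--             else:
--                 loop.pop(); loop.extend(reversed(e))
--         loops.append(list(loop))
--
--     # cut at loop intersections: a work queue of chain suffixes, each cut at its first
--     # interior point shared with another passage; track a start offset instead of
--     # copying the remaining tail at every cut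
--     reach = Counter(p for loop in loops for p in loop)
--     result = []
--     queue = deque((loop, 0) for loop in loops)
--     while queue:
--         loop, start = queue.popleft()
--         for i in range(start + 1, len(loop) - 1):
--             if reach[loop[i]] > 1:
--                 result.append(loop[start:i + 1])
--                 queue.append((loop, i))
--                 break
--         else:
--             result.append(loop[start:])
--     return result
-- ===== Notes on version B (the rewrite author's own statement) =====
-- stated objective: faster
-- what changed: B indexes edge endpoints once in hash buckets (point -> edge indices, oldest first) and extends each chain (a deque) by the oldest live matching edge found in O(1), instead of A's repeated linear rescan of the remaining lines; the cut phase becomes an explicit FIFO work queue of (chain, start-offset) pairs so cutting never re-copies the remaining tail; Pre_ excludes inputs containing an empty line, on which A raises IndexError except for the single degenerate case [[]] where B's up-front endpoint indexing raises instead.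
-- outside the precondition, e.g. on makeloops([[]], [], True): A returns [[]], B raises IndexError
import Mathlib
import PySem

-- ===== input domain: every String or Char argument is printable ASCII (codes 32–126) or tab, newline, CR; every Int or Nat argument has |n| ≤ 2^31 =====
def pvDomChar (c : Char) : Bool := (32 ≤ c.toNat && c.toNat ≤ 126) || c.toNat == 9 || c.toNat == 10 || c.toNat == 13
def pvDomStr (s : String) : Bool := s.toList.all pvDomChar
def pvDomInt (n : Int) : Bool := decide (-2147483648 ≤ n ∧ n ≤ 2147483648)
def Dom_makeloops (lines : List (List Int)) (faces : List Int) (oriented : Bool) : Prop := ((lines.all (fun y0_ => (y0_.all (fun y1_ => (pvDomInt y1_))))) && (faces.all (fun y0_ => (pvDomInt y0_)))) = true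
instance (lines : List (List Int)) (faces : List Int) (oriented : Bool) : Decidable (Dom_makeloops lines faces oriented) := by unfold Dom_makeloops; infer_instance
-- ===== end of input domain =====

-- B replaces A's repeated linear rescans with hash buckets from each endpoint to the
-- edges starting/ending there (extending by the oldest live matching edge) and runs the
-- cut phase as an explicit FIFO work queue; the equivalence below is about the return
-- value only (neither version mutates its arguments observably).

-- ===== shared helper =====
-- fuel bound for the queue traversals of the cut phase in BOTH ports (a pure totality
-- guard: each iteration strictly decreases this measure, so the fuel never runs out)
def muQ (q : List (List Int)) : Nat := (q.map (fun l => 2 * l.length + 1)).sum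

-- ===== PORT A =====
-- one pass of `for i,edge in enumerate(lines)` with the break: first matching edge is
-- consumed, the loop extended; slice assignments loop[0:1]=…/loop[-1:]=… are exact as
-- drop 1 / dropLast; `edge[-1]` / `loop[0]` are getLastD/headD (exact on Pre_: all nonempty)
def scanA (oriented : Bool) (loop : List Int) : List (List Int) → Option (List Int × List (List Int))
  | [] => none
  | edge :: rest =>
    if edge.getLastD 0 = loop.headD 0 then some (edge ++ loop.drop 1, rest)
    else if edge.headD 0 = loop.getLastD 0 then some (loop.dropLast ++ edge, rest)
    else if oriented = false ∧ edge.headD 0 = loop.headD 0 then some (edge.reverse ++ loop.drop 1, rest)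
    else if oriented = false ∧ edge.getLastD 0 = loop.getLastD 0 then some (loop.dropLast ++ edge.reverse, rest)
    else match scanA oriented loop rest with
      | some p => some (p.1, edge :: p.2)
      | none => none

-- `while found:` — repeat the scan until no edge matches; the number of remaining
-- lines doubles as fuel (each iteration consumes one line, so it never runs out)
def growA (oriented : Bool) : Nat → List Int → List (List Int) → List Int × List (List Int)
  | 0, loop, lines => (loop, lines)
  | f + 1, loop, lines =>
    match scanA oriented loop lines with
    | none => (loop, lines)
    | some p => growA oriented f p.1 p.2

-- `while lines:` — seed from lines.pop() (the LAST element), grow, append the loop;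
-- the initial number of lines doubles as fuel (each round consumes at least one line)
def phase1A (oriented : Bool) : Nat → List (List Int) → List (List Int)
  | 0, _ => []
  | f + 1, lines =>
    if lines.length = 0 then []
    else
      let p := growA oriented lines.dropLast.length (lines.getLastD []) lines.dropLast
      p.1 :: phase1A oriented f p.2

-- reach = Counter(); for loop in loops: for p in loop: reach[p] += 1
def reachA (loops : List (List Int)) : PySem.Dict Int Int :=
  loops.foldl (fun d loop => loop.foldl (fun d p => d.modify p 0 (· + 1)) d) PySem.Dict.empty

-- the scan `for i in range(1, len(loop)-1): if reach[loop[i]] > 1: … break` = first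
-- index in that range whose point is shared; exact: `reach[x]` is Counter lookup = getD 0
def cutScan (reach : PySem.Dict Int Int) (loop : List Int) : Option Nat :=
  (List.range' 1 (loop.length - 1 - 1)).find? (fun i => 1 < reach.getD (loop.getD i 0) 0)

-- `for loop in loops:` over the GROWING list with in-place truncation = a FIFO queue:
-- emit the head cut at its first interior shared point, enqueue the tail
def phase2A (reach : PySem.Dict Int Int) : Nat → List (List Int) → List (List Int)
  | 0, _ => []
  | _ + 1, [] => []
  | f + 1, loop :: rest =>
    match cutScan reach loop with
    | some i => loop.take (i + 1) :: phase2A reach f (rest ++ [loop.drop i])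
    | none => loop :: phase2A reach f rest

def makeloops (lines : List (List Int)) (faces : List Int) (oriented : Bool) : List (List Int) :=
  let loops := phase1A oriented lines.length lines
  phase2A (reachA loops) (muQ loops) loops

-- ===== PORT B =====
-- for i, e in enumerate(edges): heads[e[0]].append(i); tails[e[-1]].append(i)
def buildBuckets (edges : List (List Int)) : PySem.Dict Int (List Nat) × PySem.Dict Int (List Nat) :=
  (List.range edges.length).foldl
    (fun s i =>
      (s.1.modify ((edges.getD i []).headD 0) [] (· ++ [i]),
       s.2.modify ((edges.getD i []).getLastD 0) [] (· ++ [i])))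
    (PySem.Dict.empty, PySem.Dict.empty)

-- take(bucket): the oldest still-alive index (dead ones are only ever dropped from the
-- front of the deque, so the first live element of the stored list is exact)
def candB (alive : List Bool) (d : PySem.Dict Int (List Nat)) (p : Int) : Option Nat :=
  (d.getD p []).find? (fun i => alive.getD i false)

def bestB (oriented : Bool) (heads tails : PySem.Dict Int (List Nat)) (alive : List Bool)
    (loop : List Int) : Option Nat :=
  let cands :=
    if oriented then [candB alive tails (loop.headD 0), candB alive heads (loop.getLastD 0)]
    else [candB alive tails (loop.headD 0), candB alive heads (loop.getLastD 0),
          candB alive heads (loop.headD 0), candB alive tails (loop.getLastD 0)]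
  (cands.filterMap id).min?

-- `while True:` of Source B; the live-edge count doubles as fuel — the loop consumes one
-- live edge per iteration, so the fuel never runs out on a real run; the deque ops
-- popleft/extendleft/pop/extend are exact as the list expressions below
def growB (oriented : Bool) (edges : List (List Int)) (heads tails : PySem.Dict Int (List Nat)) :
    Nat → List Bool → List Int → List Int × List Bool × Nat
  | 0, alive, loop => (loop, alive, 0)
  | f + 1, alive, loop =>
    match bestB oriented heads tails alive loop with
    | none => (loop, alive, f + 1)
    | some i =>
      let e := edges.getD i []
      let loop' :=
        if e.getLastD 0 = loop.headD 0 then e ++ loop.drop 1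
        else if e.headD 0 = loop.getLastD 0 then loop.dropLast ++ e
        else if oriented = false ∧ e.headD 0 = loop.headD 0 then e.reverse ++ loop.drop 1
        else loop.dropLast ++ e.reverse
      growB oriented edges heads tails f (alive.set i false) loop'

-- `for seed in reversed(range(len(edges))): if not alive[seed]: continue; …`
def loopB (oriented : Bool) (edges : List (List Int)) (heads tails : PySem.Dict Int (List Nat)) :
    List Nat → Nat → List Bool → List (List Int)
  | [], _, _ => []
  | s :: rest, f, alive =>
    if alive.getD s false then
      let g := growB oriented edges heads tails (f - 1) (alive.set s false) (edges.getD s [])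
      g.1 :: loopB oriented edges heads tails rest g.2.2 g.2.1
    else loopB oriented edges heads tails rest f alive

-- reach = Counter(p for loop in loops for p in loop)
def reachB (loops : List (List Int)) : PySem.Dict Int Int :=
  PySem.Dict.counter (loops.flatMap id)

-- `for i in range(start+1, len(loop)-1): if reach[loop[i]] > 1: … break`
def cutScanFrom (reach : PySem.Dict Int Int) (loop : List Int) (start : Nat) : Option Nat :=
  (List.range' (start + 1) (loop.length - 1 - (start + 1))).find?
    (fun i => 1 < reach.getD (loop.getD i 0) 0)

-- `while queue:` — pop (chain, start), cut at the first interior shared point after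
-- start, re-enqueue (chain, cut position); loop[start:i+1] / loop[start:] are exact as
-- the drop/take below (fuelled by muQ, a pure totality guard)
def qcutB (reach : PySem.Dict Int Int) : Nat → List (List Int × Nat) → List (List Int)
  | 0, _ => []
  | _ + 1, [] => []
  | f + 1, (loop, start) :: rest =>
    match cutScanFrom reach loop start with
    | some i => (loop.take (i + 1)).drop start :: qcutB reach f (rest ++ [(loop, i)])
    | none => loop.drop start :: qcutB reach f rest

def makeloops_alt (lines : List (List Int)) (faces : List Int) (oriented : Bool) : List (List Int) :=
  let edges := lines
  let b := buildBuckets edges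
  let loops := loopB oriented edges b.1 b.2 (List.range edges.length).reverse edges.length
      (List.replicate edges.length true)
  qcutB (reachB loops) (muQ loops) (loops.map (fun loop => (loop, 0)))

-- ===== PRECONDITION & SPEC =====
-- Pre_ excludes inputs containing an empty line: on them the Python A raises IndexError
-- (edge[-1] / loop[0] on an empty list) — except the single degenerate input [[]] on
-- which A returns [[]] while B (which indexes every line's endpoints up front) raises.
def Pre_makeloops (lines : List (List Int)) (faces : List Int) (oriented : Bool) : Prop :=
  ∀ l ∈ lines, l ≠ []
instance (lines : List (List Int)) (faces : List Int) (oriented : Bool) :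
    Decidable (Pre_makeloops lines faces oriented) := by unfold Pre_makeloops; infer_instance

def pvWitness_makeloops : List (List Int) × List Int × Bool := ([[1, 2], [2, 3]], [], true)

def Spec_makeloops (lines : List (List Int)) (faces : List Int) (oriented : Bool) (out : List (List Int)) : Prop := out = makeloops_alt lines faces oriented
instance (lines : List (List Int)) (faces : List Int) (oriented : Bool) (out : List (List Int)) : Decidable (Spec_makeloops lines faces oriented out) := by unfold Spec_makeloops; infer_instance

-- ===== CLAIM (what is proved, stated in full; the proofs are below) =====
def Claim_equal_makeloops : Prop := ∀ (lines : List (List Int)) (faces : List Int) (oriented : Bool), Dom_makeloops lines faces oriented → Pre_makeloops lines faces oriented → Spec_makeloops lines faces oriented (makeloops lines faces oriented)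

-- ===== LEMMAS AND PROOFS =====

-- ===== phase 2: A's growing-list traversal IS B's offset-tracking FIFO queue =====
theorem cutScanFrom_eq (reach : PySem.Dict Int Int) (loop : List Int) (s : Nat) :
    cutScanFrom reach loop s = (cutScan reach (loop.drop s)).map (fun j => s + j) := by
  rw [cutScanFrom, cutScan]
  have hn : loop.length - 1 - (s + 1) = (loop.drop s).length - 1 - 1 := by
    simp only [List.length_drop]
    omega
  rw [hn]
  have hr : List.range' (s + 1) ((loop.drop s).length - 1 - 1) =
      List.map (fun x => s + x) (List.range' 1 ((loop.drop s).length - 1 - 1)) := by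
    rw [List.map_add_range']
  rw [hr, List.find?_map]
  have hp : ((fun i => decide (1 < reach.getD (loop.getD i 0) 0)) ∘ fun x => s + x) =
      (fun i => decide (1 < reach.getD ((loop.drop s).getD i 0) 0)) := by
    funext j
    simp only [Function.comp_apply, List.getD, List.getElem?_drop]
    rfl
  rw [hp]

theorem qcut_eq (reach : PySem.Dict Int Int) :
    ∀ (f : Nat) (Q : List (List Int × Nat)),
      phase2A reach f (Q.map (fun p => p.1.drop p.2)) = qcutB reach f Q := by
  intro f
  induction f with
  | zero => intro Q; rfl
  | succ f ih =>
    intro Q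
    cases Q with
    | nil => rfl
    | cons p rest =>
      obtain ⟨loop, s⟩ := p
      rw [List.map_cons, phase2A, qcutB, cutScanFrom_eq]
      cases hc : cutScan reach (loop.drop s) with
      | none =>
        show loop.drop s :: phase2A reach f (rest.map (fun p => p.1.drop p.2)) =
          loop.drop s :: qcutB reach f rest
        rw [ih]
      | some j =>
        show (loop.drop s).take (j + 1) ::
            phase2A reach f (rest.map (fun p => p.1.drop p.2) ++ [(loop.drop s).drop j]) =
          (loop.take (s + j + 1)).drop s :: qcutB reach f (rest ++ [(loop, s + j)])
        have h1 : (loop.take (s + j + 1)).drop s = (loop.drop s).take (j + 1) := by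
          rw [List.drop_take]
          congr 1
          omega
        have h2 : (loop.drop s).drop j = loop.drop (s + j) := by
          rw [List.drop_drop]
        rw [h1, h2, ← ih (rest ++ [(loop, s + j)])]
        simp

-- ===== phase 1: bucket / oldest-live-index selection of B equals A's first-match rescan =====

def edF (edges : List (List Int)) (i : Nat) : List Int := edges.getD i []

def aliveIdx (alive : List Bool) (n : Nat) : List Nat :=
  (List.range n).filter (fun i => alive.getD i false)

def AL (edges : List (List Int)) (alive : List Bool) : List (List Int) :=
  (aliveIdx alive edges.length).map (edF edges)

-- the four match conditions, in A's branch order, as one partial kind function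
def kcand (oriented : Bool) (edges : List (List Int)) (loop : List Int) (i : Nat) : Option Nat :=
  if (edF edges i).getLastD 0 = loop.headD 0 then some 0
  else if (edF edges i).headD 0 = loop.getLastD 0 then some 1
  else if oriented = false ∧ (edF edges i).headD 0 = loop.headD 0 then some 2
  else if oriented = false ∧ (edF edges i).getLastD 0 = loop.getLastD 0 then some 3
  else none

def applyK (k : Nat) (e loop : List Int) : List Int :=
  if k = 0 then e ++ loop.drop 1
  else if k = 1 then loop.dropLast ++ e
  else if k = 2 then e.reverse ++ loop.drop 1
  else loop.dropLast ++ e.reverse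

-- ---- A's scan characterised over an index list ----
theorem scanA_char (oriented : Bool) (edges : List (List Int)) (loop : List Int) (I : List Nat) :
    scanA oriented loop (I.map (edF edges)) =
      (I.find? (fun i => (kcand oriented edges loop i).isSome)).map
        (fun i => (applyK ((kcand oriented edges loop i).getD 0) (edF edges i) loop,
          (I.eraseP (fun i => (kcand oriented edges loop i).isSome)).map (edF edges))) := by
  induction I with
  | nil => simp [scanA]
  | cons i I ih =>
    rw [List.map_cons, scanA]
    by_cases c0 : (edF edges i).getLastD 0 = loop.headD 0
    · rw [if_pos c0]
      have hk : kcand oriented edges loop i = some 0 := by rw [kcand, if_pos c0]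
      simp [List.find?_cons, List.eraseP_cons, hk, applyK]
    · rw [if_neg c0]
      by_cases c1 : (edF edges i).headD 0 = loop.getLastD 0
      · rw [if_pos c1]
        have hk : kcand oriented edges loop i = some 1 := by rw [kcand, if_neg c0, if_pos c1]
        simp [List.find?_cons, List.eraseP_cons, hk, applyK]
      · rw [if_neg c1]
        by_cases c2 : oriented = false ∧ (edF edges i).headD 0 = loop.headD 0
        · rw [if_pos c2]
          have hk : kcand oriented edges loop i = some 2 := by
            rw [kcand, if_neg c0, if_neg c1, if_pos c2]
          simp [List.find?_cons, List.eraseP_cons, hk, applyK]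
        · rw [if_neg c2]
          by_cases c3 : oriented = false ∧ (edF edges i).getLastD 0 = loop.getLastD 0
          · rw [if_pos c3]
            have hk : kcand oriented edges loop i = some 3 := by
              rw [kcand, if_neg c0, if_neg c1, if_neg c2, if_pos c3]
            simp [List.find?_cons, List.eraseP_cons, hk, applyK]
          · rw [if_neg c3]
            have hk : kcand oriented edges loop i = none := by
              rw [kcand, if_neg c0, if_neg c1, if_neg c2, if_neg c3]
            rw [ih]
            simp only [List.find?_cons, List.eraseP_cons, hk, Option.isSome_none]
            cases hf : I.find? (fun i => (kcand oriented edges loop i).isSome) <;> simp [hf]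

-- ---- bucket characterisation ----
theorem foldl_pair {α β γ : Type} (l : List γ) (F : α → γ → α) (G : β → γ → β) (a : α) (b : β) :
    l.foldl (fun s i => (F s.1 i, G s.2 i)) (a, b) = (l.foldl F a, l.foldl G b) := by
  induction l generalizing a b with
  | nil => rfl
  | cons x l ih => simp [List.foldl_cons, ih]

theorem bucket_getD (key : Nat → Int) (l : List Nat) (p : Int) :
    (l.foldl (fun d i => d.modify (key i) [] (· ++ [i])) PySem.Dict.empty).getD p [] =
      l.filter (fun i => key i == p) := by
  have h1 : l.foldl (fun d i => d.modify (key i) [] (· ++ [i])) PySem.Dict.empty =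
      (l.map (fun i => (key i, i))).foldl (fun d q => d.modify q.1 [] (· ++ [q.2]))
        PySem.Dict.empty := by
    rw [List.foldl_map]
  rw [h1, PySem.Dict.getD_foldl_modify_append]
  rw [List.filter_map]
  simp [PySem.Dict.getD_empty, List.map_map, Function.comp_def]

theorem buildBuckets_eq (edges : List (List Int)) :
    buildBuckets edges =
      ((List.range edges.length).foldl
          (fun d i => d.modify ((edges.getD i []).headD 0) [] (· ++ [i])) PySem.Dict.empty,
       (List.range edges.length).foldl
          (fun d i => d.modify ((edges.getD i []).getLastD 0) [] (· ++ [i])) PySem.Dict.empty) := by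
  rw [buildBuckets]
  exact foldl_pair (List.range edges.length)
    (fun d i => d.modify ((edges.getD i []).headD 0) [] (· ++ [i]))
    (fun d i => d.modify ((edges.getD i []).getLastD 0) [] (· ++ [i]))
    PySem.Dict.empty PySem.Dict.empty

theorem heads_getD (edges : List (List Int)) (p : Int) :
    (buildBuckets edges).1.getD p [] =
      (List.range edges.length).filter (fun i => (edF edges i).headD 0 == p) := by
  rw [buildBuckets_eq]
  exact bucket_getD (fun i => (edF edges i).headD 0) _ p

theorem tails_getD (edges : List (List Int)) (p : Int) :
    (buildBuckets edges).2.getD p [] =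
      (List.range edges.length).filter (fun i => (edF edges i).getLastD 0 == p) := by
  rw [buildBuckets_eq]
  exact bucket_getD (fun i => (edF edges i).getLastD 0) _ p

theorem find?_filter' {α : Type} (l : List α) (p q : α → Bool) :
    (l.filter p).find? q = l.find? (fun a => p a && q a) := by
  induction l with
  | nil => rfl
  | cons x l ih =>
    by_cases hp : p x
    · by_cases hq : q x
      · simp [List.filter_cons, hp, List.find?_cons, hq]
      · simp [List.filter_cons, hp, List.find?_cons, hq, ih]
    · simp [List.filter_cons, hp, List.find?_cons, ih]

theorem candB_tails (edges : List (List Int)) (alive : List Bool) (p : Int) :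
    candB alive (buildBuckets edges).2 p =
      (aliveIdx alive edges.length).find? (fun i => (edF edges i).getLastD 0 == p) := by
  rw [candB, tails_getD, find?_filter', aliveIdx, find?_filter']
  congr 1
  funext i
  exact Bool.and_comm _ _

theorem candB_heads (edges : List (List Int)) (alive : List Bool) (p : Int) :
    candB alive (buildBuckets edges).1 p =
      (aliveIdx alive edges.length).find? (fun i => (edF edges i).headD 0 == p) := by
  rw [candB, heads_getD, find?_filter', aliveIdx, find?_filter']
  congr 1
  funext i
  exact Bool.and_comm _ _

-- min over the present candidates, as a two-argument fold (proof-side view of min())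
def minOpt : Option Nat → Option Nat → Option Nat
  | none, b => b
  | some a, none => some a
  | some a, some b => some (min a b)

-- ---- min over find?s on a sorted index list = find? of the disjunction ----
theorem find?_minOpt (I : List Nat) (hs : I.Pairwise (· < ·)) (p q : Nat → Bool) :
    minOpt (I.find? p) (I.find? q) = I.find? (fun x => p x || q x) := by
  induction I with
  | nil => rfl
  | cons x I ih =>
    have hs' : I.Pairwise (· < ·) := hs.tail
    have hlt : ∀ y ∈ I, x < y := fun y hy => List.rel_of_pairwise_cons hs hy
    by_cases hp : p x
    · by_cases hq : q x
      · rw [List.find?_cons_of_pos (p := p) hp, List.find?_cons_of_pos (p := q) hq,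
          List.find?_cons_of_pos (p := fun x => p x || q x) (by simp [hp])]
        simp [minOpt]
      · rw [List.find?_cons_of_pos (p := p) hp, List.find?_cons_of_neg (p := q) hq,
          List.find?_cons_of_pos (p := fun x => p x || q x) (by simp [hp])]
        cases hf : I.find? q with
        | none => rfl
        | some y =>
          have hy : x < y := hlt y (List.mem_of_find?_eq_some hf)
          simp [minOpt, Nat.min_eq_left (Nat.le_of_lt hy)]
    · by_cases hq : q x
      · rw [List.find?_cons_of_neg (p := p) hp, List.find?_cons_of_pos (p := q) hq,
          List.find?_cons_of_pos (p := fun x => p x || q x) (by simp [hp, hq])]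
        cases hf : I.find? p with
        | none => rfl
        | some y =>
          have hy : x < y := hlt y (List.mem_of_find?_eq_some hf)
          simp [minOpt, Nat.min_eq_right (Nat.le_of_lt hy)]
      · rw [List.find?_cons_of_neg (p := p) hp, List.find?_cons_of_neg (p := q) hq,
          List.find?_cons_of_neg (p := fun x => p x || q x) (by simp [hp, hq])]
        exact ih hs'

theorem minOpt_assoc (a b c : Option Nat) :
    minOpt (minOpt a b) c = minOpt a (minOpt b c) := by
  cases a <;> cases b <;> cases c <;> simp [minOpt, Nat.min_assoc]

theorem min?_cons_eq (x : Nat) (xs : List Nat) :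
    (x :: xs).min? = minOpt (some x) xs.min? := by
  induction xs generalizing x with
  | nil => rfl
  | cons y ys ih =>
    rw [List.min?_cons, List.min?_cons]
    cases hf : ys.min? with
    | none =>
      have : ys = [] := by
        cases ys with
        | nil => rfl
        | cons a b => rw [List.min?_cons] at hf; cases hf
      subst this
      simp [minOpt]
    | some m =>
      have h1 := ih y
      rw [List.min?_cons, hf] at h1
      have h2 := ih (min x y)
      rw [List.min?_cons, hf] at h2
      simp [minOpt] at h1 h2 ⊢
      all_goals omega

theorem foldl_minOpt_filterMap (l : List (Option Nat)) :
    ∀ a : Option Nat, minOpt a ((l.filterMap id).min?) = l.foldl minOpt a := by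
  induction l with
  | nil => intro a; cases a <;> rfl
  | cons o l ih =>
    intro a
    cases o with
    | none =>
      rw [List.filterMap_cons_none (show id (none : Option Nat) = none from rfl), List.foldl_cons]
      have : minOpt a none = a := by cases a <;> rfl
      rw [show (minOpt a none) = a from this, ih a]
    | some x =>
      rw [List.filterMap_cons_some (show id (some x) = some x from rfl), List.foldl_cons, min?_cons_eq,
        ← minOpt_assoc, ih (minOpt a (some x))]

-- the condition lists, as boolean predicates matching kcand's isSome
theorem kcand_isSome_true (edges : List (List Int)) (loop : List Int) (x : Nat) :
    (((edF edges x).getLastD 0 == loop.headD 0) || ((edF edges x).headD 0 == loop.getLastD 0)) =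
      (kcand true edges loop x).isSome := by
  rw [kcand]
  by_cases c0 : (edF edges x).getLast?.getD 0 = loop.head?.getD 0
  · simp [List.getLastD_eq_getLast?, List.headD_eq_head?, c0]
  · by_cases c1 : (edF edges x).head?.getD 0 = loop.getLast?.getD 0 <;>
      simp [List.getLastD_eq_getLast?, List.headD_eq_head?, c0, c1]

theorem kcand_isSome_false (edges : List (List Int)) (loop : List Int) (x : Nat) :
    (((((edF edges x).getLastD 0 == loop.headD 0) || ((edF edges x).headD 0 == loop.getLastD 0)) ||
      ((edF edges x).headD 0 == loop.headD 0)) || ((edF edges x).getLastD 0 == loop.getLastD 0)) =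
      (kcand false edges loop x).isSome := by
  rw [kcand]
  by_cases c0 : (edF edges x).getLast?.getD 0 = loop.head?.getD 0
  · simp [List.getLastD_eq_getLast?, List.headD_eq_head?, c0]
  · by_cases c1 : (edF edges x).head?.getD 0 = loop.getLast?.getD 0
    · simp [List.getLastD_eq_getLast?, List.headD_eq_head?, c0, c1]
    · by_cases c2 : (edF edges x).head?.getD 0 = loop.head?.getD 0
      · simp [List.getLastD_eq_getLast?, List.headD_eq_head?, c0, c1, c2]
        split <;> rfl
      · by_cases c3 : (edF edges x).getLast?.getD 0 = loop.getLast?.getD 0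
        · simp [List.getLastD_eq_getLast?, List.headD_eq_head?, c0, c1, c2, c3]
          split <;> rfl
        · simp [List.getLastD_eq_getLast?, List.headD_eq_head?, c0, c1, c2, c3]

theorem aliveIdx_sorted (alive : List Bool) (n : Nat) :
    (aliveIdx alive n).Pairwise (· < ·) := by
  exact List.Pairwise.sublist List.filter_sublist List.pairwise_lt_range

theorem bestB_char (oriented : Bool) (edges : List (List Int)) (alive : List Bool)
    (loop : List Int) :
    bestB oriented (buildBuckets edges).1 (buildBuckets edges).2 alive loop =
      (aliveIdx alive edges.length).find? (fun i => (kcand oriented edges loop i).isSome) := by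
  have hs := aliveIdx_sorted alive edges.length
  cases oriented with
  | true =>
    have hb : bestB true (buildBuckets edges).1 (buildBuckets edges).2 alive loop =
        ([candB alive (buildBuckets edges).2 (loop.headD 0),
          candB alive (buildBuckets edges).1 (loop.getLastD 0)].filterMap id).min? := rfl
    rw [hb]
    have h := foldl_minOpt_filterMap
      [candB alive (buildBuckets edges).2 (loop.headD 0),
       candB alive (buildBuckets edges).1 (loop.getLastD 0)] none
    rw [show (minOpt none (([candB alive (buildBuckets edges).2 (loop.headD 0),
       candB alive (buildBuckets edges).1 (loop.getLastD 0)].filterMap id).min?)) =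
      ([candB alive (buildBuckets edges).2 (loop.headD 0),
       candB alive (buildBuckets edges).1 (loop.getLastD 0)].filterMap id).min? from rfl] at h
    rw [h]
    simp only [List.foldl_cons, List.foldl_nil]
    rw [show minOpt none (candB alive (buildBuckets edges).2 (loop.headD 0)) =
      candB alive (buildBuckets edges).2 (loop.headD 0) from rfl]
    rw [candB_tails, candB_heads, find?_minOpt _ hs]
    congr 1
    funext x
    exact kcand_isSome_true edges loop x
  | false =>
    have hb : bestB false (buildBuckets edges).1 (buildBuckets edges).2 alive loop =
        ([candB alive (buildBuckets edges).2 (loop.headD 0),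
          candB alive (buildBuckets edges).1 (loop.getLastD 0),
          candB alive (buildBuckets edges).1 (loop.headD 0),
          candB alive (buildBuckets edges).2 (loop.getLastD 0)].filterMap id).min? := rfl
    rw [hb]
    have h := foldl_minOpt_filterMap
      [candB alive (buildBuckets edges).2 (loop.headD 0),
       candB alive (buildBuckets edges).1 (loop.getLastD 0),
       candB alive (buildBuckets edges).1 (loop.headD 0),
       candB alive (buildBuckets edges).2 (loop.getLastD 0)] none
    rw [show (minOpt none (([candB alive (buildBuckets edges).2 (loop.headD 0),
       candB alive (buildBuckets edges).1 (loop.getLastD 0),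
       candB alive (buildBuckets edges).1 (loop.headD 0),
       candB alive (buildBuckets edges).2 (loop.getLastD 0)].filterMap id).min?)) =
      ([candB alive (buildBuckets edges).2 (loop.headD 0),
       candB alive (buildBuckets edges).1 (loop.getLastD 0),
       candB alive (buildBuckets edges).1 (loop.headD 0),
       candB alive (buildBuckets edges).2 (loop.getLastD 0)].filterMap id).min? from rfl] at h
    rw [h]
    simp only [List.foldl_cons, List.foldl_nil]
    rw [show minOpt none (candB alive (buildBuckets edges).2 (loop.headD 0)) =
      candB alive (buildBuckets edges).2 (loop.headD 0) from rfl]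
    rw [candB_tails, candB_heads, candB_heads, candB_tails,
      find?_minOpt _ hs, find?_minOpt _ hs, find?_minOpt _ hs]
    congr 1
    funext x
    exact kcand_isSome_false edges loop x

-- B's recheck chain applies exactly the first matching branch
theorem chain_eq_applyK (oriented : Bool) (edges : List (List Int)) (loop : List Int) (i : Nat)
    (h : (kcand oriented edges loop i).isSome = true) :
    (if (edges.getD i []).getLastD 0 = loop.headD 0 then (edges.getD i []) ++ loop.drop 1
     else if (edges.getD i []).headD 0 = loop.getLastD 0 then loop.dropLast ++ (edges.getD i [])
     else if oriented = false ∧ (edges.getD i []).headD 0 = loop.headD 0 then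
       (edges.getD i []).reverse ++ loop.drop 1
     else loop.dropLast ++ (edges.getD i []).reverse) =
      applyK ((kcand oriented edges loop i).getD 0) (edF edges i) loop := by
  rw [kcand] at h ⊢
  rw [show edF edges i = edges.getD i [] from rfl] at *
  split_ifs at h ⊢ with c0 c1 c2 c3 <;> simp_all [applyK]

-- ---- consuming an edge: set-false on the B side = erase on the index list ----
theorem eraseP_eq_erase_of_find? {I : List Nat} (q : Nat → Bool) {i : Nat} (hnd : I.Nodup)
    (h : I.find? q = some i) : I.eraseP q = I.erase i := by
  induction I with
  | nil => cases h
  | cons x I ih =>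
    by_cases hq : q x
    · rw [List.find?_cons_of_pos hq] at h
      cases h
      rw [List.eraseP_cons_of_pos hq, List.erase_cons_head]
    · rw [List.find?_cons_of_neg hq] at h
      have hmem : i ∈ I := List.mem_of_find?_eq_some h
      have hne : x ≠ i := fun he => (List.nodup_cons.mp hnd).1 (he ▸ hmem)
      rw [List.eraseP_cons_of_neg hq, List.erase_cons_tail (by simpa using hne),
        ih (List.nodup_cons.mp hnd).2 h]

theorem aliveIdx_nodup (alive : List Bool) (n : Nat) : (aliveIdx alive n).Nodup :=
  List.Sublist.nodup List.filter_sublist (List.nodup_range)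

theorem getD_set_false (alive : List Bool) (i j : Nat) :
    (alive.set i false).getD j false = if j = i then false else alive.getD j false := by
  induction alive generalizing i j with
  | nil =>
    simp only [List.set_nil]
    split <;> rfl
  | cons a l ih =>
    cases i with
    | zero =>
      cases j with
      | zero => rfl
      | succ j => simp [List.set]
    | succ i =>
      cases j with
      | zero => simp [List.set]
      | succ j =>
        simp only [List.set, List.getD_cons_succ, ih i j]
        by_cases hji : j = i
        · simp [hji]
        · simp [hji]

theorem filter_set_false (alive : List Bool) (i : Nat) (hi : alive.getD i false = true) :
    ∀ (l : List Nat), l.Nodup →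
      l.filter (fun j => (alive.set i false).getD j false) =
        (l.filter (fun j => alive.getD j false)).erase i := by
  intro l hnd
  induction l with
  | nil => rfl
  | cons x l ih =>
    have hnd' := (List.nodup_cons.mp hnd).2
    have hxl := (List.nodup_cons.mp hnd).1
    by_cases hxi : x = i
    · subst hxi
      have hLc : (alive.set x false).getD x false = false := by
        rw [getD_set_false, if_pos rfl]
      rw [List.filter_cons, List.filter_cons, hLc]
      rw [if_neg (by simp), if_pos hi, List.erase_cons_head]
      apply List.filter_congr
      intro j hj
      rw [getD_set_false, if_neg (fun (he : j = x) => hxl (he ▸ hj))]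
    · have hLc : (alive.set i false).getD x false = alive.getD x false := by
        rw [getD_set_false, if_neg hxi]
      rw [List.filter_cons, List.filter_cons, hLc]
      by_cases hgx : alive.getD x false = true
      · rw [if_pos hgx, if_pos hgx, List.erase_cons_tail (by simp [hxi]), ih hnd']
      · rw [if_neg hgx, if_neg hgx, ih hnd']

theorem aliveIdx_set_false (alive : List Bool) (n i : Nat) (hi : alive.getD i false = true) :
    aliveIdx (alive.set i false) n = (aliveIdx alive n).erase i := by
  rw [aliveIdx, aliveIdx, filter_set_false alive i hi _ List.nodup_range]

theorem mem_aliveIdx {alive : List Bool} {n i : Nat} (h : i ∈ aliveIdx alive n) :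
    alive.getD i false = true ∧ i < n := by
  rw [aliveIdx] at h
  have h2 := List.mem_filter.mp h
  exact ⟨h2.2, List.mem_range.mp h2.1⟩


theorem growB_fuel_le (oriented : Bool) (edges : List (List Int))
    (heads tails : PySem.Dict Int (List Nat)) (f : Nat) (alive : List Bool) (loop : List Int) :
    (growB oriented edges heads tails f alive loop).2.2 ≤ f := by
  induction f generalizing alive loop with
  | zero => simp [growB]
  | succ f ih =>
    rw [growB]
    split
    · simp
    · exact Nat.le_trans (ih _ _) (Nat.le_succ f)

-- ---- the inner `while` loops agree ----
theorem grow_eq (oriented : Bool) (edges : List (List Int)) :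
    ∀ (f : Nat) (alive : List Bool) (loop : List Int),
      alive.length = edges.length →
      (aliveIdx alive edges.length).length = f →
      growA oriented f loop (AL edges alive) =
          ((growB oriented edges (buildBuckets edges).1 (buildBuckets edges).2 f alive loop).1,
            AL edges (growB oriented edges (buildBuckets edges).1 (buildBuckets edges).2 f alive loop).2.1) ∧
        (aliveIdx (growB oriented edges (buildBuckets edges).1 (buildBuckets edges).2 f alive loop).2.1
            edges.length).length =
          (growB oriented edges (buildBuckets edges).1 (buildBuckets edges).2 f alive loop).2.2 ∧
        (growB oriented edges (buildBuckets edges).1 (buildBuckets edges).2 f alive loop).2.1.length =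
          edges.length ∧
        (∀ j, (growB oriented edges (buildBuckets edges).1 (buildBuckets edges).2 f alive loop).2.1.getD
            j false = true → alive.getD j false = true) := by
  intro f
  induction f with
  | zero =>
    intro alive loop hlen hcnt
    have hnil : aliveIdx alive edges.length = [] := List.length_eq_zero_iff.mp hcnt
    have hAL : AL edges alive = [] := by rw [AL, hnil]; rfl
    rw [growB, hAL, growA]
    exact ⟨rfl, by rw [hcnt], hlen, fun j hj => hj⟩
  | succ f ih =>
    intro alive loop hlen hcnt
    have hbest := bestB_char oriented edges alive loop
    have hscan := scanA_char oriented edges loop (aliveIdx alive edges.length)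
    rw [show (aliveIdx alive edges.length).map (edF edges) = AL edges alive from rfl] at hscan
    cases hfind : (aliveIdx alive edges.length).find?
        (fun i => (kcand oriented edges loop i).isSome) with
    | none =>
      have hb : bestB oriented (buildBuckets edges).1 (buildBuckets edges).2 alive loop = none := by
        rw [hbest, hfind]
      have hA : scanA oriented loop (AL edges alive) = none := by rw [hscan, hfind]; rfl
      rw [growB, hb, growA, hA]
      exact ⟨rfl, hcnt, hlen, fun j hj => hj⟩
    | some i =>
      have hks : (kcand oriented edges loop i).isSome = true :=
        List.find?_some (p := fun i => (kcand oriented edges loop i).isSome) hfind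
      have hmem : i ∈ aliveIdx alive edges.length := List.mem_of_find?_eq_some hfind
      obtain ⟨halivei, hilt⟩ := mem_aliveIdx hmem
      have hb : bestB oriented (buildBuckets edges).1 (buildBuckets edges).2 alive loop =
          some i := by
        rw [hbest, hfind]
      have hA : scanA oriented loop (AL edges alive) =
          some (applyK ((kcand oriented edges loop i).getD 0) (edF edges i) loop,
            (((aliveIdx alive edges.length).eraseP
              (fun i => (kcand oriented edges loop i).isSome)).map (edF edges))) := by
        rw [hscan, hfind]; rfl
      have herase : (aliveIdx alive edges.length).eraseP
          (fun i => (kcand oriented edges loop i).isSome) =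
          aliveIdx (alive.set i false) edges.length := by
        rw [eraseP_eq_erase_of_find? _ (aliveIdx_nodup alive edges.length) hfind,
          ← aliveIdx_set_false alive edges.length i halivei]
      have hcnt' : (aliveIdx (alive.set i false) edges.length).length = f := by
        rw [aliveIdx_set_false alive edges.length i halivei,
          List.length_erase_of_mem hmem, hcnt]
        omega
      have hlen' : (alive.set i false).length = edges.length := by
        rw [List.length_set]; exact hlen
      have ihh := ih (alive.set i false)
        (applyK ((kcand oriented edges loop i).getD 0) (edF edges i) loop) hlen' hcnt'
      have hgB : growB oriented edges (buildBuckets edges).1 (buildBuckets edges).2 (f + 1)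
          alive loop =
          growB oriented edges (buildBuckets edges).1 (buildBuckets edges).2 f
            (alive.set i false)
            (applyK ((kcand oriented edges loop i).getD 0) (edF edges i) loop) := by
        rw [growB, hb]
        simp only []
        rw [chain_eq_applyK oriented edges loop i hks]
      have hgA : growA oriented (f + 1) loop (AL edges alive) =
          growA oriented f (applyK ((kcand oriented edges loop i).getD 0) (edF edges i) loop)
            (AL edges (alive.set i false)) := by
        rw [growA, hA]
        rw [show ((aliveIdx alive edges.length).eraseP
            (fun i => (kcand oriented edges loop i).isSome)).map (edF edges) =
          AL edges (alive.set i false) by rw [herase]; rfl]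
      rw [hgA, hgB]
      refine ⟨ihh.1, ihh.2.1, ihh.2.2.1, ?_⟩
      intro j hj
      have h1 := ihh.2.2.2 j hj
      rw [getD_set_false] at h1
      by_cases hji : j = i
      · rw [if_pos hji] at h1; cases h1
      · rw [if_neg hji] at h1; exact h1

-- ---- the outer loops agree ----
theorem sorted_getLast_dropLast {I : List Nat} (hs : I.Pairwise (· < ·)) (hnd : I.Nodup)
    {m : Nat} (hm : m ∈ I) (hmax : ∀ j ∈ I, j ≤ m) :
    I.getLast? = some m ∧ I.dropLast = I.erase m := by
  induction I with
  | nil => cases hm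
  | cons x I ih =>
    cases I with
    | nil =>
      have : m = x := by
        cases hm with
        | head => rfl
        | tail _ h => cases h
      subst this
      exact ⟨rfl, by simp⟩
    | cons y J =>
      have hs' := hs.tail
      have hnd' := (List.nodup_cons.mp hnd).2
      have hxm : x < m := by
        have hy : x < y := List.rel_of_pairwise_cons hs (by simp)
        have hmem : m ∈ y :: J := by
          cases hm with
          | head =>
            exfalso
            have := hmax y (by simp)
            omega
          | tail _ h => exact h
        rcases hmem with _ | hmem'
        · exact hy
        · exact Nat.lt_trans hy (List.rel_of_pairwise_cons hs' (by assumption))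
      have hmem : m ∈ y :: J := by
        cases hm with
        | head => omega
        | tail _ h => exact h
      have hmax' : ∀ j ∈ y :: J, j ≤ m := fun j hj => hmax j (List.mem_cons_of_mem x hj)
      obtain ⟨h1, h2⟩ := ih hs' hnd' hmem hmax'
      constructor
      · rw [List.getLast?_cons_cons, h1]
      · rw [show (x :: y :: J).dropLast = x :: (y :: J).dropLast from rfl,
          List.erase_cons_tail (by simp; omega), h2]

theorem getD_true_lt {alive : List Bool} {s : Nat} (h : alive.getD s false = true) :
    s < alive.length := by
  by_contra hge
  rw [List.getD, List.getElem?_eq_none (by omega), Option.getD_none] at h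
  cases h

theorem outer_eq (oriented : Bool) (edges : List (List Int)) :
    ∀ (seeds : List Nat) (fA f : Nat) (alive : List Bool),
      alive.length = edges.length →
      (aliveIdx alive edges.length).length = f →
      f ≤ fA →
      seeds.Pairwise (· > ·) →
      (∀ j ∈ aliveIdx alive edges.length, j ∈ seeds) →
      phase1A oriented fA (AL edges alive) =
        loopB oriented edges (buildBuckets edges).1 (buildBuckets edges).2 seeds f alive := by
  intro seeds
  induction seeds with
  | nil =>
    intro fA f alive hlen hcnt _ _ hsub
    have hnil : aliveIdx alive edges.length = [] := by
      apply List.eq_nil_iff_forall_not_mem.mpr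
      intro j hj
      exact absurd (hsub j hj) (by simp)
    have hAL : AL edges alive = [] := by rw [AL, hnil]; rfl
    rw [hAL, loopB]
    cases fA with
    | zero => rfl
    | succ fA => rw [phase1A]; simp
  | cons s rest ih =>
    intro fA f alive hlen hcnt hfa hpw hsub
    rw [loopB]
    by_cases hals : alive.getD s false = true
    · rw [if_pos hals]
      have hslt : s < edges.length := by
        have := getD_true_lt hals
        omega
      have hmem : s ∈ aliveIdx alive edges.length := by
        rw [aliveIdx, List.mem_filter]
        exact ⟨List.mem_range.mpr hslt, hals⟩
      have hmax : ∀ j ∈ aliveIdx alive edges.length, j ≤ s := by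
        intro j hj
        rcases List.mem_cons.mp (hsub j hj) with hje | hjr
        · omega
        · exact Nat.le_of_lt (List.rel_of_pairwise_cons hpw hjr)
      obtain ⟨hlast, hdrop⟩ := sorted_getLast_dropLast (aliveIdx_sorted alive edges.length)
        (aliveIdx_nodup alive edges.length) hmem hmax
      have hALne : AL edges alive ≠ [] := by
        rw [AL]
        intro he
        have := List.map_eq_nil_iff.mp he
        rw [this] at hmem
        cases hmem
      have hseed : (AL edges alive).getLastD [] = edges.getD s [] := by
        rw [AL, List.getLastD_eq_getLast?, List.getLast?_map, hlast]
        rfl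
      have hrem : (AL edges alive).dropLast = AL edges (alive.set s false) := by
        rw [AL, ← List.map_dropLast, hdrop,
          ← aliveIdx_set_false alive edges.length s hals]
        rfl
      have hcnt' : (aliveIdx (alive.set s false) edges.length).length = f - 1 := by
        rw [aliveIdx_set_false alive edges.length s hals,
          List.length_erase_of_mem hmem, hcnt]
      have hlen' : (alive.set s false).length = edges.length := by
        rw [List.length_set]; exact hlen
      have hgrow := grow_eq oriented edges (f - 1) (alive.set s false) (edges.getD s [])
        hlen' hcnt'
      have hf1 : 1 ≤ f := by
        have : s ∈ aliveIdx alive edges.length := hmem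
        have := List.length_pos_of_mem this
        omega
      obtain ⟨fA', rfl⟩ : ∃ fA', fA = fA' + 1 := ⟨fA - 1, by omega⟩
      rw [phase1A, if_neg (by simpa using hALne)]
      have hfuel : (AL edges alive).dropLast.length = f - 1 := by
        rw [hrem, AL, List.length_map, hcnt']
      rw [hfuel, hseed, hrem]
      have hfle := growB_fuel_le oriented edges (buildBuckets edges).1 (buildBuckets edges).2
        (f - 1) (alive.set s false) (edges.getD s [])
      generalize hgdef : growB oriented edges (buildBuckets edges).1 (buildBuckets edges).2
        (f - 1) (alive.set s false) (edges.getD s []) = g at hgrow hfle ⊢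
      simp only [hgrow.1]
      have hsub' : ∀ j ∈ aliveIdx g.2.1 edges.length, j ∈ rest := by
        intro j hj
        obtain ⟨hjal, hjlt⟩ := mem_aliveIdx hj
        have h1 := hgrow.2.2.2 j hjal
        rw [getD_set_false] at h1
        by_cases hjs : j = s
        · rw [if_pos hjs] at h1; cases h1
        · rw [if_neg hjs] at h1
          have : j ∈ aliveIdx alive edges.length := by
            rw [aliveIdx, List.mem_filter]
            exact ⟨List.mem_range.mpr hjlt, h1⟩
          rcases List.mem_cons.mp (hsub j this) with hje | hjr
          · omega
          · exact hjr
      rw [ih fA' g.2.2 g.2.1 hgrow.2.2.1 hgrow.2.1 (by omega) hpw.tail hsub']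
    · rw [if_neg hals]
      have hsub' : ∀ j ∈ aliveIdx alive edges.length, j ∈ rest := by
        intro j hj
        have hja := (mem_aliveIdx hj).1
        rcases List.mem_cons.mp (hsub j hj) with hje | hjr
        · subst hje; exact absurd hja hals
        · exact hjr
      exact ih fA f alive hlen hcnt hfa hpw.tail hsub'

-- ---- both reach Counters are the same dict ----
theorem foldl_flatMap_id (F : PySem.Dict Int Int → Int → PySem.Dict Int Int)
    (ls : List (List Int)) (d : PySem.Dict Int Int) :
    (ls.flatMap id).foldl F d = ls.foldl (fun d l => l.foldl F d) d := by
  induction ls generalizing d with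
  | nil => rfl
  | cons l ls ih => rw [List.flatMap_cons, List.foldl_cons, List.foldl_append, ih]; rfl

theorem reach_eq (loops : List (List Int)) : reachA loops = reachB loops := by
  rw [reachA, reachB, PySem.Dict.counter_eq_foldl,
    foldl_flatMap_id (fun d x => d.modify x 0 (· + 1)) loops PySem.Dict.empty]

theorem aliveIdx_init (n : Nat) : aliveIdx (List.replicate n true) n = List.range n := by
  rw [aliveIdx]
  have hcg : ∀ j ∈ List.range n,
      ((List.replicate n true).getD j false) = (fun (_ : Nat) => true) j := by
    intro j hj
    have hlt : j < n := List.mem_range.mp hj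
    simp [List.getD, List.getElem?_replicate, hlt]
  rw [List.filter_congr hcg]
  simp

theorem AL_init (edges : List (List Int)) :
    AL edges (List.replicate edges.length true) = edges := by
  rw [AL, aliveIdx_init]
  apply List.ext_getElem
  · simp
  · intro i hi1 hi2
    simp only [List.getElem_map, List.getElem_range, edF, List.getD]
    rw [List.getElem?_eq_getElem hi2]
    rfl

theorem makeloops_main (lines : List (List Int)) (faces : List Int) (oriented : Bool) :
    makeloops lines faces oriented = makeloops_alt lines faces oriented := by
  have h1 : phase1A oriented lines.length lines =
      loopB oriented lines (buildBuckets lines).1 (buildBuckets lines).2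
        (List.range lines.length).reverse lines.length (List.replicate lines.length true) := by
    have hpw : (List.range lines.length).reverse.Pairwise (· > ·) := by
      rw [List.pairwise_reverse]
      exact List.pairwise_lt_range
    have hsub : ∀ j ∈ aliveIdx (List.replicate lines.length true) lines.length,
        j ∈ (List.range lines.length).reverse := by
      intro j hj
      rw [List.mem_reverse, List.mem_range]
      exact (mem_aliveIdx hj).2
    have := outer_eq oriented lines (List.range lines.length).reverse lines.length
      lines.length (List.replicate lines.length true) (by simp)
      (by rw [aliveIdx_init]; simp) (Nat.le_refl _) hpw hsub
    rw [AL_init] at this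
    exact this
  have h2 : ((loopB oriented lines (buildBuckets lines).1 (buildBuckets lines).2
        (List.range lines.length).reverse lines.length (List.replicate lines.length true)).map
      (fun loop => (loop, 0))).map (fun (p : List Int × Nat) => p.1.drop p.2) =
      loopB oriented lines (buildBuckets lines).1 (buildBuckets lines).2
        (List.range lines.length).reverse lines.length (List.replicate lines.length true) := by
    simp [Function.comp_def]
  show phase2A (reachA (phase1A oriented lines.length lines))
      (muQ (phase1A oriented lines.length lines)) (phase1A oriented lines.length lines) =
    qcutB (reachB (loopB oriented lines (buildBuckets lines).1 (buildBuckets lines).2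
        (List.range lines.length).reverse lines.length (List.replicate lines.length true)))
      (muQ (loopB oriented lines (buildBuckets lines).1 (buildBuckets lines).2
        (List.range lines.length).reverse lines.length (List.replicate lines.length true)))
      ((loopB oriented lines (buildBuckets lines).1 (buildBuckets lines).2
        (List.range lines.length).reverse lines.length (List.replicate lines.length true)).map
        (fun loop => (loop, 0)))
  rw [← qcut_eq, h2, ← h1, ← reach_eq]

-- ===== VERDICT (by name: the statement is the Claim_ definition above) =====
theorem makeloops_spec : Claim_equal_makeloops := by
  intro lines faces oriented _ _
  exact makeloops_main lines faces oriented
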